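-- pv_equiv track=rewrite | github.com/ericmerle3789/Collatz-Junction-Theorem | scripts/research/r51_tql_induction.py | compute_shifted_tail_distribution_bf
-- ===== SOURCE A (Python) =====
-- from math import comb, gcd, ceil, log2, sqrt
-- from itertools import combinations_with_replacement
--
-- def compute_S(k):
--     """Minimal S such that 2^S > 3^k. Exact via integer comparison."""
--     S = ceil(k * log2(3))
--     three_k = 3 ** k
--     while (1 << S) <= three_k:
--         S += 1
--     while S > 0 and (1 << (S - 1)) > three_k:
--         S -= 1
--     return S
--
-- def compute_max_B(k):
--     """max_B = S - k."""
--     return compute_S(k) - k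
--
-- def compute_g(p):
--     """g = 2 * 3^{-1} mod p. Universal (independent of k)."""
--     if gcd(3, p) != 1 or gcd(2, p) != 1:
--         return None
--     return (2 * pow(3, -1, p)) % p
--
-- def compute_shifted_tail_distribution_bf(k, p, b0):
--     """Shifted tail distribution: translate B_j -> B_j' = B_j - b0.
--
--     After translation, B_j' in [0, max_B - b0], nondecreasing, B'_{k-1} = max_B - b0.
--     P_tail = Sum_{j=1}^{k-1} g^j * 2^{B_j} = 2^{b0} * Sum_{j=1}^{k-1} g^j * 2^{B_j'} mod p.
--
--     So P_tail = 2^{b0} * P_shifted where P_shifted = Sum_{j=1}^{k-1} g^j * 2^{B_j'}.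
--
--     Returns: (count_shifted[p], total_count)
--     where count_shifted[r] = #{B' : P_shifted = r mod p}
--     """
--     max_B = compute_max_B(k)
--     g = compute_g(p)
--     if g is None:
--         return None, 0
--
--     max_B_prime = max_B - b0
--     count = [0] * p
--     total = 0
--
--     if k <= 1:
--         return count, 0
--
--     g_pows = [pow(g, j, p) for j in range(k)]
--     two_pows = [pow(2, b, p) for b in range(max_B_prime + 1)]
--
--     if k == 2:
--         # B'_1 = max_B - b0
--         r = (g_pows[1] * two_pows[max_B_prime]) % p
--         count[r] = 1
--         return count, 1
--
--     # k >= 3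
--     last_term = (g_pows[k - 1] * two_pows[max_B_prime]) % p
--
--     for combo in combinations_with_replacement(range(max_B_prime + 1), k - 2):
--         res = 0
--         for idx, bj in enumerate(combo):
--             # B'_{idx+1}, coefficient g^{idx+1}
--             res = (res + g_pows[idx + 1] * two_pows[bj]) % p
--         res = (res + last_term) % p
--         count[res] += 1
--         total += 1
--
--     return count, total
-- ===== SOURCE B (Python) =====
-- from math import gcd
--
-- def _compute_S(k):
--     """Minimal S with 2^S > 3^k, by exact doubling search from 0."""
--     S = 0
--     three_k = 3 ** k
--     while (1 << S) <= three_k: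
--         S += 1
--     return S
--
-- def _compute_g(p):
--     if gcd(3, p) != 1 or gcd(2, p) != 1:
--         return None
--     return (2 * pow(3, -1, p)) % p
--
-- def compute_shifted_tail_distribution_bf(k, p, b0):
--     """DP over (position, last value, residue): suffix distributions f[v][r] =
--     #nondecreasing tails with values in [v, m] and residue r, built from the
--     end; O(k*m*p) instead of enumerating all C(m+k-2, k-2) sequences."""
--     g = _compute_g(p)
--     if g is None:
--         return None, 0
--     m = _compute_S(k) - k - b0
--     if k <= 1:
--         return [0] * p, 0
--     t = k - 2
--     last_term = (pow(g, k - 1, p) * pow(2, m, p)) % p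
--     base = [0] * p
--     base[0] = 1
--     f = [base[:] for _ in range(m + 2)]
--     for s in range(t):
--         gj = pow(g, t - s, p)
--         nf = [[0] * p]              # rows for v = m+1 downto current, built downward
--         for i in range(m + 1):
--             v = m - i
--             shift = (gj * pow(2, v, p)) % p
--             below = nf[0]
--             row = [f[v][(r - shift) % p] + below[r] for r in range(p)]
--             nf.insert(0, row)
--         f = nf
--     dist = f[0]
--     count = [dist[(r - last_term) % p] for r in range(p)]
--     return count, sum(dist)
-- ===== Notes on version B (the rewrite author's own statement) =====
-- stated objective: faster
-- what changed: Replaces brute-force enumeration of all C(m+k-2, k-2) nondecreasing exponent sequences by a dynamic program over (position, last value, residue) that propagates whole residue-distribution rows with a running suffix accumulator, O(k*m*p) total.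
import Mathlib
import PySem

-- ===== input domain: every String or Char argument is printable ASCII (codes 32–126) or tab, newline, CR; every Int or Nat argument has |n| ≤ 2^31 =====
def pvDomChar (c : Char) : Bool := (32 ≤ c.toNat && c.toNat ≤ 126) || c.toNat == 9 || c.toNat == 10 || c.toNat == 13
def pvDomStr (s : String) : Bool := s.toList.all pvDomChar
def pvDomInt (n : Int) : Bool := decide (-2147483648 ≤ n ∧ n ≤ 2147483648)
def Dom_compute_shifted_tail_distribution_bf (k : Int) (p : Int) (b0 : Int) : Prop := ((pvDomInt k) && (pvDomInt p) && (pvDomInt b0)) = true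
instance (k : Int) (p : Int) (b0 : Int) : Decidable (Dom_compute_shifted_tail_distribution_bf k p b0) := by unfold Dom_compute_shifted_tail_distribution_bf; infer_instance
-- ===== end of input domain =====

-- B replaces A's brute-force enumeration of all nondecreasing exponent sequences by a
-- dynamic program over (position, last value, residue); equivalence is proved on Pre_
-- (exactly the inputs where the Python A returns instead of raising).

-- ===== PORT A =====
-- shared module helpers (compute_S / compute_max_B / compute_g are module-level helpers
-- used verbatim by both Source A and Source B, so both ports share these definitions)

-- Python compute_S starts its upward scan at ceil(k*log2(3)) (a float guess) and then
-- corrects in both directions; the correction loops make the result the minimal S with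
-- 2^S > 3^k independently of the start, so this port starts the upward scan at 0 —
-- exact for every k ≥ 0 (k < 0 raises in Python and is excluded by Pre_).
def pvSLoopUp (n : Nat) (S : Nat) : Nat :=
  if 2 ^ S ≤ n then pvSLoopUp n (S + 1) else S
termination_by n + 1 - 2 ^ S
decreasing_by
  have h1 : 2 ^ S < 2 ^ (S + 1) := Nat.pow_lt_pow_right (by omega) (by omega)
  omega

def pvSLoopDown (n : Nat) (S : Nat) : Nat :=
  if h : 0 < S ∧ n < 2 ^ (S - 1) then pvSLoopDown n (S - 1) else S
termination_by S
decreasing_by omega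

def pvComputeS (k : Int) : Int :=
  ((pvSLoopDown (3 ^ k.toNat) (pvSLoopUp (3 ^ k.toNat) 0) : Nat) : Int)

def pvComputeMaxB (k : Int) : Int := pvComputeS k - k

-- pow(3, -1, p): hand-ported modular inverse of 3; exact modulo p for every p ≥ 1 with
-- gcd(3,p) = 1, which covers all inputs of Pre_ on which g's value reaches the output
-- (for p < 1 Pre_ only admits inputs whose result does not depend on g's value).
def pvInv3 (p : Int) : Int := if p % 3 = 1 then (2 * p + 1) / 3 else (p + 1) / 3

def pvComputeG (p : Int) : Option Int :=
  if Int.gcd 3 p ≠ 1 ∨ Int.gcd 2 p ≠ 1 then none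
  else some (PySem.Int.mod (2 * pvInv3 p) p)

-- itertools.combinations_with_replacement(xs, n), hand-ported (PySem has no primitive
-- for it); produces exactly Python's tuples in Python's order.
def pvCWR : List Int → Nat → List (List Int)
  | _, 0 => [[]]
  | [], _ + 1 => []
  | x :: rest, n + 1 => (pvCWR (x :: rest) n).map (fun c => x :: c) ++ pvCWR rest (n + 1)
termination_by xs n => (n, xs.length)

def compute_shifted_tail_distribution_bf (k : Int) (p : Int) (b0 : Int) : Option (List Int) × Int :=
  let max_B := pvComputeMaxB k
  match pvComputeG p with
  | none => (none, 0)
  | some g =>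
    let m := max_B - b0
    let count : List Int := List.replicate p.toNat 0
    if k ≤ 1 then (some count, 0)
    else
      let g_pows := (PySem.List.pyRange 0 k 1).map (fun j => PySem.Int.powMod g j.toNat p)
      let two_pows := (PySem.List.pyRange 0 (m + 1) 1).map (fun b => PySem.Int.powMod 2 b.toNat p)
      if k = 2 then
        let r := PySem.Int.mod (PySem.List.pyGetD g_pows 1 0 * PySem.List.pyGetD two_pows m 0) p
        -- count[r] = 1 : exact for 0 ≤ r < p (guaranteed inside Pre_)
        (some (PySem.List.pySetD count r 1), 1)
      else
        let last_term := PySem.Int.mod (PySem.List.pyGetD g_pows (k - 1) 0 * PySem.List.pyGetD two_pows m 0) p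
        let st := (pvCWR (PySem.List.pyRange 0 (m + 1) 1) (k - 2).toNat).foldl
          (fun (st : List Int × Int) combo =>
            let res := (PySem.List.enumerate combo).foldl
              (fun res ib => PySem.Int.mod
                (res + PySem.List.pyGetD g_pows (ib.1 + 1) 0 * PySem.List.pyGetD two_pows ib.2 0) p) 0
            let res2 := PySem.Int.mod (res + last_term) p
            -- count[res2] += 1 : exact for 0 ≤ res2 < p (guaranteed inside Pre_)
            (st.1.modify res2.toNat (· + 1), st.2 + 1)) (count, 0)
        (some st.1, st.2)

-- ===== PORT B =====
-- Source B's _compute_S: the same minimal-S search started directly at 0 (no float guess,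
-- no downward correction needed).
def pvComputeS_alt (k : Int) : Int := ((pvSLoopUp (3 ^ k.toNat) 0 : Nat) : Int)

-- base = [0]*p; base[0] = 1
def pvBaseRow (p : Int) : List Int := PySem.List.pySetD (List.replicate p.toNat 0) 0 1

-- the inner loop of Source B: builds the new rows nf[v], v = m+1 down to m-i+1, prepending
-- each row (nf.insert(0, row)); row r = f[v][(r - shift) % p] + below[r].
def pvSuffRows (p : Int) (gj : Int) (f : List (List Int)) (m : Nat) : Nat → List (List Int)
  | 0 => [List.replicate p.toNat 0]
  | i + 1 =>
      let rest := pvSuffRows p gj f m i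
      let v := m - i
      let shift := PySem.Int.mod (gj * PySem.Int.powMod 2 v p) p
      let below := rest.headD []
      let row := (List.range p.toNat).map (fun (r : Nat) =>
        PySem.List.pyGetD (f.getD v []) (PySem.Int.mod (((r : Nat) : Int) - shift) p) 0
          + PySem.List.pyGetD below ((r : Nat) : Int) 0)
      row :: rest

def compute_shifted_tail_distribution_bf_alt (k : Int) (p : Int) (b0 : Int) : Option (List Int) × Int :=
  match pvComputeG p with
  | none => (none, 0)
  | some g =>
    let m := pvComputeS_alt k - k - b0
    if k ≤ 1 then (some (List.replicate p.toNat 0), 0)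
    else
      let t := k - 2
      -- pow(g, k-1, p), pow(2, m, p): exponents are ≥ 0 on every input Pre_ admits here
      let last_term := PySem.Int.mod
        (PySem.Int.powMod g (k - 1).toNat p * PySem.Int.powMod 2 m.toNat p) p
      let f0 : List (List Int) := List.replicate (m.toNat + 2) (pvBaseRow p)
      let f := (PySem.List.pyRange 0 t 1).foldl
        (fun f s => pvSuffRows p (PySem.Int.powMod g (t - s).toNat p) f m.toNat (m.toNat + 1)) f0
      let dist := f.headD []
      let count := (List.range p.toNat).map (fun (r : Nat) =>
        PySem.List.pyGetD dist (PySem.Int.mod (((r : Nat) : Int) - last_term) p) 0)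
      (some count, dist.sum)

-- ===== PRECONDITION & SPEC =====
-- Pre_ admits exactly the inputs on which the Python A returns normally: it excludes
-- k < 0 (ValueError: negative shift in compute_S) and, for k ≥ 2 with g defined,
-- p < 1 or b0 > max_B (IndexError on count/two_pows).  '2^(k+b0-1) ≤ 3^k' is the
-- closed form of 'b0 ≤ max_B' (max_B = S - k, S minimal with 2^S > 3^k).
def Pre_compute_shifted_tail_distribution_bf (k : Int) (p : Int) (b0 : Int) : Prop :=
  0 ≤ k ∧ (Int.gcd 3 p ≠ 1 ∨ Int.gcd 2 p ≠ 1 ∨ k ≤ 1 ∨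
    (1 ≤ p ∧ (k + b0 ≤ 0 ∨ (2 : Int) ^ ((k + b0 - 1).toNat) ≤ 3 ^ k.toNat)))
instance (k : Int) (p : Int) (b0 : Int) : Decidable (Pre_compute_shifted_tail_distribution_bf k p b0) := by
  unfold Pre_compute_shifted_tail_distribution_bf; infer_instance

def pvWitness_compute_shifted_tail_distribution_bf : Int × Int × Int := (3, 5, 0)

def Spec_compute_shifted_tail_distribution_bf (k : Int) (p : Int) (b0 : Int) (out : Option (List Int) × Int) : Prop := out = compute_shifted_tail_distribution_bf_alt k p b0
instance (k : Int) (p : Int) (b0 : Int) (out : Option (List Int) × Int) : Decidable (Spec_compute_shifted_tail_distribution_bf k p b0 out) := by unfold Spec_compute_shifted_tail_distribution_bf; infer_instance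

-- ===== CLAIM (what is proved, stated in full; the proofs are below) =====
def Claim_equal_compute_shifted_tail_distribution_bf : Prop := ∀ (k : Int) (p : Int) (b0 : Int), Dom_compute_shifted_tail_distribution_bf k p b0 → Pre_compute_shifted_tail_distribution_bf k p b0 → Spec_compute_shifted_tail_distribution_bf k p b0 (compute_shifted_tail_distribution_bf k p b0)

-- ===== LEMMAS AND PROOFS =====

theorem pv_spec_up (n : Nat) (S : Nat) (h : S = 0 ∨ 2 ^ (S - 1) ≤ n) :
    n < 2 ^ pvSLoopUp n S ∧ (pvSLoopUp n S = 0 ∨ 2 ^ (pvSLoopUp n S - 1) ≤ n)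
      ∧ S ≤ pvSLoopUp n S := by
  fun_induction pvSLoopUp n S with
  | case1 S hle ih =>
      have := ih (Or.inr (by simpa using hle))
      exact ⟨this.1, this.2.1, by omega⟩
  | case2 S hle => exact ⟨by omega, h, le_refl _⟩

theorem pv_down_noop (n S : Nat) (h : S = 0 ∨ 2 ^ (S - 1) ≤ n) :
    pvSLoopDown n S = S := by
  rw [pvSLoopDown, dif_neg (by omega)]

theorem pv_S_eq (k : Int) : pvComputeS k = pvComputeS_alt k := by
  unfold pvComputeS pvComputeS_alt
  rw [pv_down_noop _ _ (pv_spec_up (3 ^ k.toNat) 0 (Or.inl rfl)).2.1]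

-- the upward scan lands strictly above 3^k and at most one power above it
theorem pv_S_bounds (k : Int) :
    1 ≤ pvSLoopUp (3 ^ k.toNat) 0 ∧
    3 ^ k.toNat < 2 ^ pvSLoopUp (3 ^ k.toNat) 0 ∧
    2 ^ (pvSLoopUp (3 ^ k.toNat) 0 - 1) ≤ 3 ^ k.toNat := by
  have hn : 1 ≤ 3 ^ k.toNat := Nat.one_le_pow _ _ (by omega)
  obtain ⟨h1, h2, _⟩ := pv_spec_up (3 ^ k.toNat) 0 (Or.inl rfl)
  refine ⟨?_, h1, ?_⟩
  · rcases Nat.eq_zero_or_pos (pvSLoopUp (3 ^ k.toNat) 0) with h | h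
    · rw [h] at h1; simp at h1
    · exact h
  · rcases h2 with h | h
    · rw [h] at h1; simp at h1
    · exact h

-- the closed form in Pre_ is exactly 'b0 ≤ max_B' (k ≥ 0)
theorem pv_maxB_iff (k b0 : Int) :
    (k + b0 ≤ 0 ∨ (2 : Int) ^ ((k + b0 - 1).toNat) ≤ 3 ^ k.toNat) ↔
      b0 ≤ pvComputeMaxB k := by
  obtain ⟨hR1, hR2, hR3⟩ := pv_S_bounds k
  set R := pvSLoopUp (3 ^ k.toNat) 0 with hR
  have hS : pvComputeS k = (R : Int) := by
    rw [pv_S_eq]; unfold pvComputeS_alt; rw [← hR]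
  unfold pvComputeMaxB
  rw [hS]
  constructor
  · rintro (h | h)
    · omega
    · by_contra hcon
      have hx : R ≤ (k + b0 - 1).toNat := by omega
      have : (2 : Nat) ^ R ≤ 2 ^ (k + b0 - 1).toNat := Nat.pow_le_pow_right (by omega) hx
      have h' : (2 : Int) ^ (k + b0 - 1).toNat ≤ ((3 ^ k.toNat : Nat) : Int) := by
        push_cast; exact h
      have h'' : (2 : Nat) ^ (k + b0 - 1).toNat ≤ 3 ^ k.toNat := by exact_mod_cast h'
      omega
  · intro h
    by_cases h0 : k + b0 ≤ 0
    · exact Or.inl h0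
    · right
      have hx : (k + b0 - 1).toNat ≤ R - 1 := by omega
      have : (2 : Nat) ^ (k + b0 - 1).toNat ≤ 2 ^ (R - 1) := Nat.pow_le_pow_right (by omega) hx
      have h'' : (2 : Nat) ^ (k + b0 - 1).toNat ≤ 3 ^ k.toNat := le_trans this hR3
      exact_mod_cast h''


-- residue shift is a bijection on canonical residues
theorem pv_shift_bij (p s y r : Int) (hy0 : 0 ≤ y) (hy1 : y < p)
    (hr0 : 0 ≤ r) (hr1 : r < p) : ((s + y) % p = r ↔ y = (r - s) % p) := by
  constructor
  · intro h
    subst h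
    have h1 : ((s + y) % p - s) % p = (s + y - s) % p := by
      rw [Int.sub_emod, Int.emod_emod_of_dvd _ dvd_rfl, ← Int.sub_emod]
    have h2 : s + y - s = y := by ring
    rw [h1, h2, Int.emod_eq_of_lt hy0 hy1]
  · intro h
    subst h
    rw [Int.add_emod_emod]
    have h2 : s + (r - s) = r := by ring
    rw [h2, Int.emod_eq_of_lt hr0 hr1]

-- mathematical residue of a tail sequence, coefficient exponents starting at j
def pvSum (g p : Int) : Nat → List Int → Int
  | _, [] => 0
  | j, v :: c => PySem.Int.powMod g j p * PySem.Int.powMod 2 v.toNat p + pvSum g p (j + 1) c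

def pvCanon (g p : Int) (j : Nat) (c : List Int) : Int := pvSum g p j c % p

theorem pv_canon_nonneg (g p : Int) (hp : 0 < p) (j : Nat) (c : List Int) :
    0 ≤ pvCanon g p j c := Int.emod_nonneg _ (by omega)

theorem pv_canon_lt (g p : Int) (hp : 0 < p) (j : Nat) (c : List Int) :
    pvCanon g p j c < p := Int.emod_lt_of_pos _ hp

theorem pv_canon_cons (g p : Int) (hp : 0 < p) (j : Nat) (w : Int) (c : List Int)
    (r : Int) (hr0 : 0 ≤ r) (hr1 : r < p) :
    (pvCanon g p j (w :: c) = r ↔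
      pvCanon g p (j + 1) c =
        (r - (PySem.Int.powMod g j p * PySem.Int.powMod 2 w.toNat p) % p) % p) := by
  have h1 : pvCanon g p j (w :: c) =
      ((PySem.Int.powMod g j p * PySem.Int.powMod 2 w.toNat p) % p + pvCanon g p (j + 1) c) % p := by
    unfold pvCanon
    rw [show pvSum g p j (w :: c) =
        PySem.Int.powMod g j p * PySem.Int.powMod 2 w.toNat p + pvSum g p (j + 1) c from rfl]
    rw [Int.emod_add_emod, Int.add_emod_emod]
  rw [h1]
  exact pv_shift_bij p _ _ r (pv_canon_nonneg g p hp _ c) (pv_canon_lt g p hp _ c) hr0 hr1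

theorem pv_cwr_cons (x : Int) (rest : List Int) (n : Nat) :
    pvCWR (x :: rest) (n + 1) = (pvCWR (x :: rest) n).map (fun c => x :: c) ++ pvCWR rest (n + 1) := by
  rw [pvCWR.eq_def]

theorem pv_cwr_mem (xs : List Int) (n : Nat) :
    ∀ c ∈ pvCWR xs n, ∀ x ∈ c, x ∈ xs := by
  fun_induction pvCWR xs n with
  | case1 xs => intro c hc; simp at hc; subst hc; simp
  | case2 n => intro c hc; simp at hc
  | case3 x rest n ih1 ih2 =>
      intro c hc
      rcases List.mem_append.mp hc with h | h
      · obtain ⟨c', hc', rfl⟩ := List.mem_map.mp h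
        intro y hy
        rcases List.mem_cons.mp hy with rfl | hy
        · simp
        · exact ih1 c' hc' y hy
      · intro y hy
        exact List.mem_cons_of_mem _ (ih2 c h y hy)

theorem pv_cwr_length (xs : List Int) (n : Nat) :
    ∀ c ∈ pvCWR xs n, c.length = n := by
  fun_induction pvCWR xs n with
  | case1 xs => intro c hc; simp at hc; subst hc; simp
  | case2 n => intro c hc; simp at hc
  | case3 x rest n ih1 ih2 =>
      intro c hc
      rcases List.mem_append.mp hc with h | h
      · obtain ⟨c', hc', rfl⟩ := List.mem_map.mp h
        simp [ih1 c' hc']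
      · exact ih2 c h

-- the distribution row the DP maintains: residue histogram of pvCWR([v..m], n)
def pvRow (g p : Int) (m : Nat) (j n v : Nat) : List Int :=
  (List.range p.toNat).map (fun (r : Nat) =>
    (((pvCWR (PySem.List.pyRange (v : Int) ((m : Int) + 1) 1) n).countP
        (fun c => decide (pvCanon g p j c = (r : Int)))) : Int))

-- one cell of the DP recurrence, read off the pvCWR recursion
theorem pv_rowRec (g p : Int) (hp : 0 < p) (m v : Nat) (hv : v ≤ m) (j n : Nat)
    (r : Int) (hr0 : 0 ≤ r) (hr1 : r < p) :
    ((pvCWR (PySem.List.pyRange (v : Int) ((m : Int) + 1) 1) (n + 1)).countP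
        (fun c => decide (pvCanon g p j c = r)))
    = ((pvCWR (PySem.List.pyRange (v : Int) ((m : Int) + 1) 1) n).countP
        (fun c => decide (pvCanon g p (j + 1) c =
          (r - (PySem.Int.powMod g j p * PySem.Int.powMod 2 v p) % p) % p)))
      + ((pvCWR (PySem.List.pyRange ((v : Int) + 1) ((m : Int) + 1) 1) (n + 1)).countP
        (fun c => decide (pvCanon g p j c = r))) := by
  have hlt : (v : Int) < (m : Int) + 1 := by exact_mod_cast Nat.lt_succ_of_le hv
  rw [PySem.List.pyRange_one_cons hlt, pv_cwr_cons, List.countP_append, List.countP_map]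
  congr 1
  apply List.countP_congr
  intro c hc
  simpa using pv_canon_cons g p hp j (v : Int) c r hr0 hr1

theorem pv_cwr_nil (n : Nat) : pvCWR [] (n + 1) = [] := by rw [pvCWR.eq_def]

theorem pv_row_top (g p : Int) (m : Nat) (j n : Nat) :
    pvRow g p m j (n + 1) (m + 1) = List.replicate p.toNat 0 := by
  unfold pvRow
  rw [PySem.List.pyRange_one_eq_nil (by push_cast; omega), pv_cwr_nil]
  simp [List.map_const']

-- getD / pyGetD access into a row built as a map over List.range
theorem pv_getD_map_range {α : Type} [Inhabited α] (N : Nat) (F : Nat → α) (v : Nat)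
    (hv : v < N) (d : α) : ((List.range N).map F).getD v d = F v := by
  simp [List.getD, hv]

theorem pv_pyGetD_map_range (N : Nat) (F : Nat → Int) (q : Int)
    (h0 : 0 ≤ q) (h1 : q < N) (d : Int) :
    PySem.List.pyGetD ((List.range N).map F) q d = F q.toNat := by
  rw [PySem.List.pyGetD_eq_getElem _ d h0 (by simpa using h1)]
  simp

-- the inner loop of Source B computes exactly the DP rows
theorem pv_suffRows (g p : Int) (hp : 0 < p) (m : Nat) (j n : Nat) :
    ∀ i, i ≤ m + 1 →
    pvSuffRows p (PySem.Int.powMod g j p)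
        ((List.range (m + 2)).map (fun v => pvRow g p m (j + 1) n v)) m i
      = (List.range (i + 1)).map (fun d => pvRow g p m j (n + 1) (m + 1 - i + d)) := by
  intro i
  induction i with
  | zero =>
      intro _
      rw [pvSuffRows]
      simp only [show List.range (0 + 1) = [0] from rfl, List.map_cons, List.map_nil]
      rw [show m + 1 - 0 + 0 = m + 1 by omega, pv_row_top]
  | succ i ih =>
      intro hi
      have him : i ≤ m := by omega
      rw [pvSuffRows]
      rw [ih (by omega)]
      have hhead : (((List.range (i + 1)).map
          (fun d => pvRow g p m j (n + 1) (m + 1 - i + d))).headD []) =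
          pvRow g p m j (n + 1) (m - i + 1) := by
        rw [List.range_succ_eq_map]
        simp only [List.map_cons, List.headD_cons]
        congr 1
        omega
      rw [hhead]
      have hgetD : (((List.range (m + 2)).map (fun v => pvRow g p m (j + 1) n v)).getD (m - i) []) =
          pvRow g p m (j + 1) n (m - i) := pv_getD_map_range _ _ _ (by omega) _
      rw [hgetD]
      -- split goal into head and tail
      conv_rhs => rw [List.range_succ_eq_map]
      simp only [List.map_cons, List.map_map]
      congr 1
      · -- head row satisfies the recurrence, cell by cell
        rw [show m + 1 - (i + 1) + 0 = m - i by omega]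
        unfold pvRow
        apply List.map_congr_left
        intro r hr
        have hrN : r < p.toNat := List.mem_range.mp hr
        have hr0 : (0 : Int) ≤ (r : Int) := by positivity
        have hr1 : (r : Int) < p := by omega
        simp only [PySem.Int.mod_eq_emod_of_pos hp]
        have hq0 : (0 : Int) ≤ ((r : Int) - PySem.Int.powMod g j p * PySem.Int.powMod 2 (m - i) p % p) % p :=
          Int.emod_nonneg _ (by omega)
        have hq1 : ((r : Int) - PySem.Int.powMod g j p * PySem.Int.powMod 2 (m - i) p % p) % p < p :=
          Int.emod_lt_of_pos _ hp
        rw [pv_pyGetD_map_range _ _ _ hq0 (by omega) 0,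
          pv_pyGetD_map_range _ _ _ hr0 (by omega) 0]
        rw [Int.toNat_natCast]
        rw [Int.toNat_of_nonneg hq0]
        rw [show (((m - i + 1 : Nat)) : Int) = ((m - i : Nat) : Int) + 1 by push_cast; omega]
        rw [pv_rowRec g p hp m (m - i) (by omega) j n (r : Int) hr0 hr1]
        push_cast
        ring
      · -- the already-built rows, reindexed
        apply List.map_congr_left
        intro d _
        simp only [Function.comp]
        congr 1
        omega
theorem pv_cwr_zero (xs : List Int) : pvCWR xs 0 = [[]] := by
  cases xs <;> rw [pvCWR.eq_def]

theorem pv_canon_nil (g p : Int) (J : Nat) : pvCanon g p J [] = 0 := by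
  unfold pvCanon
  rw [show pvSum g p J [] = 0 from rfl, Int.zero_emod]

theorem pv_row_zero (g p : Int) (m : Nat) (J v : Nat) :
    pvRow g p m J 0 v = pvBaseRow p := by
  unfold pvRow pvBaseRow
  rw [pv_cwr_zero, PySem.List.pySetD_of_nonneg (h := by norm_num)]
  apply List.ext_getElem (by simp)
  intro i h1 h2
  simp only [List.getElem_map, List.getElem_range, List.countP_cons, List.countP_nil,
    pv_canon_nil, List.getElem_set, List.getElem_replicate]
  simp only [List.length_map, List.length_range] at h1
  by_cases h : i = 0
  · subst h; simp
  · have hne : ¬ ((0 : Int) = (i : Int)) := by omega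
    simp [hne]
    omega

theorem pv_f0 (g p : Int) (m : Nat) (J : Nat) :
    List.replicate (m + 2) (pvBaseRow p) = (List.range (m + 2)).map (fun v => pvRow g p m J 0 v) := by
  have : (List.range (m + 2)).map (fun v => pvRow g p m J 0 v)
      = (List.range (m + 2)).map (fun _ => pvBaseRow p) :=
    List.map_congr_left (fun v _ => pv_row_zero g p m J v)
  rw [this, List.map_const', List.length_range]

-- the outer loop of Source B: after s steps the DP rows are the pvCWR histograms
theorem pv_outer (g p : Int) (hp : 0 < p) (m T : Nat) :
    ∀ s, s ≤ T →
    (PySem.List.pyRange 0 (s : Int) 1).foldl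
        (fun f s' => pvSuffRows p (PySem.Int.powMod g ((T : Int) - s').toNat p) f m (m + 1))
        (List.replicate (m + 2) (pvBaseRow p))
      = (List.range (m + 2)).map (fun v => pvRow g p m (T - s + 1) s v) := by
  intro s
  induction s with
  | zero =>
      intro _
      rw [show ((0 : Nat) : Int) = 0 from rfl, PySem.List.pyRange_one_eq_nil (by omega)]
      simp only [List.foldl_nil, Nat.sub_zero]
      exact pv_f0 g p m (T + 1)
  | succ s ih =>
      intro hs
      rw [show ((s + 1 : Nat) : Int) = (s : Int) + 1 by push_cast; ring,
        PySem.List.pyRange_one_succ_right (by omega), List.foldl_append, ih (by omega)]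
      simp only [List.foldl_cons, List.foldl_nil]
      rw [show ((T : Int) - (s : Int)).toNat = T - s by omega]
      have hstep := pv_suffRows g p hp m (T - s) s (m + 1) (by omega)
      rw [show T - s + 1 = T - s + 1 from rfl] at hstep
      rw [hstep]
      apply List.map_congr_left
      intro d _
      congr 1
      · omega
      · omega

-- A's inner residue fold equals the mathematical residue pvSum … % p
theorem pv_resFold (g p m k : Int) (hp : 0 < p) :
    ∀ (c : List Int) (j : Nat) (a : Int), 0 ≤ a → a < p →
      (∀ x ∈ c, 0 ≤ x ∧ x < m + 1) → (j : Int) + c.length + 2 ≤ k →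
      (PySem.List.enumerate c (j : Int)).foldl
        (fun res ib =>
          (res + PySem.List.pyGetD ((PySem.List.pyRange 0 k 1).map (fun j => PySem.Int.powMod g j.toNat p)) (ib.1 + 1) 0
            * PySem.List.pyGetD ((PySem.List.pyRange 0 (m + 1) 1).map (fun b => PySem.Int.powMod 2 b.toNat p)) ib.2 0) % p) a
      = (a + pvSum g p (j + 1) c) % p := by
  intro c
  induction c with
  | nil =>
      intro j a h0 h1 _ _
      rw [PySem.List.enumerate_nil, List.foldl_nil,
        show pvSum g p (j + 1) [] = 0 from rfl, add_zero, Int.emod_eq_of_lt h0 h1]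
  | cons v c ihc =>
      intro j a h0 h1 hx hlen
      have hlen' : (j : Int) + 1 < k := by
        simp only [List.length_cons] at hlen; push_cast at hlen; omega
      rw [PySem.List.enumerate_cons, List.foldl_cons]
      rw [PySem.List.pyGetD_map_pyRange_of_nonneg _ _ _ _ (by omega) hlen']
      rw [PySem.List.pyGetD_map_pyRange_of_nonneg _ _ _ _ (hx v (by simp)).1 (hx v (by simp)).2]
      rw [show ((j : Int) + 1) = ((j + 1 : Nat) : Int) by push_cast; ring]
      rw [ihc (j + 1) _ (Int.emod_nonneg _ (by omega)) (Int.emod_lt_of_pos _ hp)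
        (fun x hxm => hx x (List.mem_cons_of_mem _ hxm))
        (by simp only [List.length_cons] at hlen; push_cast at hlen ⊢; omega)]
      rw [Int.emod_add_emod]
      rw [show pvSum g p (j + 1) (v :: c) =
        PySem.Int.powMod g (j + 1) p * PySem.Int.powMod 2 v.toNat p + pvSum g p (j + 2) c from rfl]
      rw [show (((j + 1 : Nat) : Int)).toNat = j + 1 by omega]
      congr 1
      ring

theorem pv_modify_map_range (N : Nat) (F : Nat → Int) (n : Nat) :
    ((List.range N).map F).modify n (· + 1)
      = (List.range N).map (fun r => if r = n then F r + 1 else F r) := by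
  apply List.ext_getElem (by simp)
  intro i h1 h2
  simp only [List.getElem_modify, List.getElem_map, List.getElem_range]
  rcases eq_or_ne i n with rfl | h
  · simp
  · simp [h, Ne.symm h]

-- A's histogram loop counts, per residue cell, the combos hitting that cell
theorem pv_countFold (p : Int) (I : List Int → Int) :
    ∀ (L : List (List Int)) (F : Nat → Int) (tot : Int),
      (∀ c ∈ L, 0 ≤ I c ∧ I c < p) →
      L.foldl (fun (st : List Int × Int) c => (st.1.modify (I c).toNat (· + 1), st.2 + 1))
        ((List.range p.toNat).map F, tot)
      = ((List.range p.toNat).map (fun (r : Nat) => F r + (L.countP (fun c => decide (I c = ((r : Nat) : Int))) : Int)),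
         tot + L.length) := by
  intro L
  induction L with
  | nil => intro F tot _; simp
  | cons c L ih =>
      intro F tot hI
      have hc := hI c (by simp)
      simp only [List.foldl_cons]
      rw [pv_modify_map_range]
      rw [ih (fun r => if r = (I c).toNat then F r + 1 else F r) (tot + 1)
        (fun c' hc' => hI c' (List.mem_cons_of_mem _ hc'))]
      refine Prod.ext ?_ ?_
      · apply List.map_congr_left
        intro r hr
        have hrN : r < p.toNat := List.mem_range.mp hr
        rw [List.countP_cons]
        by_cases h : r = (I c).toNat
        · have htrue : I c = ((r : Nat) : Int) := by omega
          have hpred : (decide (I c = ((r : Nat) : Int))) = true := decide_eq_true htrue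
          simp only [if_pos h, hpred, if_true]
          push_cast
          ring
        · have hfalse : ¬ (I c = ((r : Nat) : Int)) := by omega
          have hpred : (decide (I c = ((r : Nat) : Int))) = false := by simpa using hfalse
          simp only [if_neg h, hpred]
          push_cast
          ring
      · simp only [List.length_cons]
        push_cast
        ring

theorem pv_sum_ite (x : Int) : ∀ N : Nat, 0 ≤ x → x < N →
    ((List.range N).map (fun (r : Nat) => if x = ((r : Nat) : Int) then (1 : Int) else 0)).sum = 1 := by
  intro N
  induction N with
  | zero => intro h0 h1; omega
  | succ N ih =>
      intro h0 h1
      rw [List.range_succ, List.map_append, List.sum_append]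
      by_cases h : x = (N : Int)
      · have hzero : ((List.range N).map (fun (r : Nat) => if x = ((r : Nat) : Int) then (1 : Int) else 0))
            = (List.range N).map (fun _ => (0 : Int)) :=
          List.map_congr_left (fun r hr => if_neg (by have := List.mem_range.mp hr; omega))
        rw [hzero]
        simp [h]
      · have hx : x < (N : Int) := by omega
        rw [ih h0 hx]
        simp [h]

-- the histogram's total mass is the number of combos
theorem pv_sumRow (p : Int) (hp : 0 < p) (I : List Int → Int) :
    ∀ L : List (List Int), (∀ c ∈ L, 0 ≤ I c ∧ I c < p) →
      ((List.range p.toNat).map (fun (r : Nat) => (L.countP (fun c => decide (I c = ((r : Nat) : Int))) : Int))).sum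
        = L.length := by
  intro L
  induction L with
  | nil => intro _; simp
  | cons c L ih =>
      intro hI
      have hc := hI c (by simp)
      have hsplit : ((List.range p.toNat).map
          (fun (r : Nat) => ((c :: L).countP (fun c' => decide (I c' = ((r : Nat) : Int))) : Int)))
          = (List.range p.toNat).map (fun (r : Nat) =>
            (L.countP (fun c' => decide (I c' = ((r : Nat) : Int))) : Int)
              + (if I c = ((r : Nat) : Int) then (1 : Int) else 0)) := by
        apply List.map_congr_left
        intro r _
        rw [List.countP_cons]
        by_cases h : I c = (r : Int) <;> simp [h]
      rw [hsplit, PySem.List.sum_map_add_int]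
      rw [ih (fun c' hc' => hI c' (List.mem_cons_of_mem _ hc'))]
      rw [pv_sum_ite (I c) p.toNat hc.1 (by omega)]
      simp only [List.length_cons]
      push_cast
      ring

theorem pv_replicate_eq_map (N : Nat) : List.replicate N (0 : Int) = (List.range N).map (fun _ => (0 : Int)) := by
  rw [List.map_const', List.length_range]

-- B's DP result row, extracted
theorem pv_alt_eval (k p b0 g : Int) (hg : pvComputeG p = some g) (hk1 : ¬ k ≤ 1)
    (hp : 0 < p) :
    compute_shifted_tail_distribution_bf_alt k p b0 =
      (some ((List.range p.toNat).map (fun (r : Nat) =>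
          PySem.List.pyGetD (pvRow g p (pvComputeMaxB k - b0).toNat 1 (k - 2).toNat 0)
            ((((r : Nat) : Int) -
              (PySem.Int.powMod g (k - 1).toNat p * PySem.Int.powMod 2 (pvComputeMaxB k - b0).toNat p) % p) % p) 0)),
        (pvRow g p (pvComputeMaxB k - b0).toNat 1 (k - 2).toNat 0).sum) := by
  have hms : pvComputeS_alt k - k - b0 = pvComputeMaxB k - b0 := by
    rw [← pv_S_eq]; unfold pvComputeMaxB; ring
  unfold compute_shifted_tail_distribution_bf_alt
  simp only [hg, if_neg hk1, hms, PySem.Int.mod_eq_emod_of_pos hp]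
  have ht : k - 2 = (((k - 2).toNat : Nat) : Int) := by omega
  rw [ht]
  simp only [Int.toNat_natCast]
  rw [pv_outer g p hp (pvComputeMaxB k - b0).toNat (k - 2).toNat (k - 2).toNat (le_refl _)]
  rw [Nat.sub_self]
  rw [show (pvComputeMaxB k - b0).toNat + 2 = ((pvComputeMaxB k - b0).toNat + 1) + 1 from rfl,
    List.range_succ_eq_map]
  simp only [List.map_cons, List.headD_cons]

theorem compute_shifted_tail_distribution_bf_spec : Claim_equal_compute_shifted_tail_distribution_bf := by
  unfold Claim_equal_compute_shifted_tail_distribution_bf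
  intro k p b0 _ hpre
  unfold Spec_compute_shifted_tail_distribution_bf
  obtain ⟨hk0, hdisj⟩ := hpre
  cases hg : pvComputeG p with
  | none =>
      unfold compute_shifted_tail_distribution_bf compute_shifted_tail_distribution_bf_alt
      simp only [hg]
  | some g =>
      have hgcd : Int.gcd 3 p = 1 ∧ Int.gcd 2 p = 1 := by
        by_cases hcond : (Int.gcd 3 p ≠ 1 ∨ Int.gcd 2 p ≠ 1)
        · unfold pvComputeG at hg; rw [if_pos hcond] at hg; cases hg
        · exact ⟨not_not.mp (fun h => hcond (Or.inl h)), not_not.mp (fun h => hcond (Or.inr h))⟩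
      by_cases hk1 : k ≤ 1
      · unfold compute_shifted_tail_distribution_bf compute_shifted_tail_distribution_bf_alt
        simp only [hg, if_pos hk1]
      · have hk2 : 2 ≤ k := by omega
        have hpm : 1 ≤ p ∧ b0 ≤ pvComputeMaxB k := by
          rcases hdisj with h | h | h | h
          · exact absurd hgcd.1 h
          · exact absurd hgcd.2 h
          · exact absurd h hk1
          · exact ⟨h.1, (pv_maxB_iff k b0).mp h.2⟩
        have hp : 0 < p := by omega
        have hm0 : (0 : Int) ≤ pvComputeMaxB k - b0 := by omega
        rw [pv_alt_eval k p b0 g hg hk1 hp]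
        by_cases hk2' : k = 2
        · -- k = 2: A's special branch vs the DP with zero middle positions
          subst hk2'
          unfold compute_shifted_tail_distribution_bf
          simp only [hg, if_neg hk1, ite_true, PySem.Int.mod_eq_emod_of_pos hp]
          rw [PySem.List.pyGetD_map_pyRange_of_nonneg _ _ _ _ (by norm_num) (by norm_num)]
          rw [PySem.List.pyGetD_map_pyRange_of_nonneg _ _ _ _ (by omega) (by omega)]
          rw [show ((2 : Int) - 1).toNat = (1 : Int).toNat by norm_num] at *
          set m := pvComputeMaxB 2 - b0 with hmdef
          set L := (PySem.Int.powMod g (1 : Int).toNat p * PySem.Int.powMod 2 m.toNat p) % p with hLdef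
          have hL0' : (0 : Int) ≤ L := Int.emod_nonneg _ (by omega)
          have hL1' : L < p := Int.emod_lt_of_pos _ hp
          have hrow : pvRow g p m.toNat 1 (2 - 2 : Int).toNat 0
              = (List.range p.toNat).map (fun (r : Nat) =>
                  ((List.countP (fun c => decide (pvCanon g p 1 c = ((r : Nat) : Int))) [[]] : Nat) : Int)) := by
            unfold pvRow
            rw [show ((2 : Int) - 2).toNat = 0 by norm_num, pv_cwr_zero]
          simp only [Prod.mk.injEq, Option.some.injEq]
          refine ⟨?_, ?_⟩
          · apply List.ext_getElem (by simp [PySem.List.length_pySetD])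
            intro i h1 h2
            simp only [PySem.List.length_pySetD, List.length_replicate] at h1
            simp only [PySem.List.pySetD_of_nonneg (h := hL0')]
            have hq0 : (0 : Int) ≤ ((i : Int) - L) % p := Int.emod_nonneg _ (by omega)
            have hq1 : ((i : Int) - L) % p < p := Int.emod_lt_of_pos _ hp
            simp only [List.getElem_set, List.getElem_replicate, List.getElem_map, List.getElem_range]
            rw [hrow, pv_pyGetD_map_range _ _ _ hq0 (by omega) 0]
            simp only [List.countP_cons, List.countP_nil, pv_canon_nil]
            rw [Int.toNat_of_nonneg hq0]
            have hbij := pv_shift_bij p L 0 (i : Int) (by norm_num) hp (by omega) (by omega)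
            rw [add_zero, Int.emod_eq_of_lt hL0' hL1'] at hbij
            by_cases hLi : L.toNat = i
            · have hLe : L = (i : Int) := by omega
              have hq : (0 : Int) = ((i : Int) - L) % p := hbij.mp hLe
              rw [if_pos hLi, ← hq]
              simp
            · have hLe : ¬ (L = (i : Int)) := by omega
              have hq : ¬ ((0 : Int) = ((i : Int) - L) % p) := fun h => hLe (hbij.mpr h)
              rw [if_neg hLi]
              simp [hq]
          · rw [hrow, pv_sumRow p hp (pvCanon g p 1) [[]]
              (fun c _ => ⟨pv_canon_nonneg g p hp 1 c, pv_canon_lt g p hp 1 c⟩)]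
            simp
        · -- k ≥ 3: A's brute force vs the DP
          have hk3 : 3 ≤ k := by omega
          unfold compute_shifted_tail_distribution_bf
          simp only [hg, if_neg hk1, if_neg hk2', PySem.Int.mod_eq_emod_of_pos hp]
          rw [PySem.List.pyGetD_map_pyRange_of_nonneg _ _ _ _ (by omega) (by omega)]
          rw [PySem.List.pyGetD_map_pyRange_of_nonneg _ _ _ _ (by omega) (by omega)]
          set m := pvComputeMaxB k - b0 with hmdef
          set L := (PySem.Int.powMod g (k - 1).toNat p * PySem.Int.powMod 2 m.toNat p) % p with hLdef
          have hL0' : (0 : Int) ≤ L := Int.emod_nonneg _ (by omega)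
          have hL1' : L < p := Int.emod_lt_of_pos _ hp
          set T := (k - 2).toNat with hTdef
          set combos := pvCWR (PySem.List.pyRange 0 (m + 1) 1) T with hcombos
          have hbody : ∀ (st : List Int × Int), ∀ c ∈ combos,
              (st.1.modify ((((PySem.List.enumerate c 0).foldl (fun res ib =>
                  (res + PySem.List.pyGetD ((PySem.List.pyRange 0 k 1).map (fun j => PySem.Int.powMod g j.toNat p)) (ib.1 + 1) 0
                    * PySem.List.pyGetD ((PySem.List.pyRange 0 (m + 1) 1).map (fun b => PySem.Int.powMod 2 b.toNat p)) ib.2 0) % p) 0)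
                 + L) % p).toNat (fun x => x + 1), st.2 + 1)
              = ((st.1.modify (((pvCanon g p 1 c + L) % p).toNat) (fun x => x + 1), st.2 + 1)
                  : List Int × Int) := by
            intro st c hc
            have hlen := pv_cwr_length _ _ c hc
            have hlenInt : (c.length : Int) = k - 2 := by rw [hlen]; omega
            have hmem : ∀ x ∈ c, 0 ≤ x ∧ x < m + 1 := by
              intro x hx
              exact PySem.List.mem_pyRange_one.mp (pv_cwr_mem _ _ c hc x hx)
            have hres := pv_resFold g p m k hp c 0 0 (le_refl 0) hp hmem (by omega)
            simp only [Nat.cast_zero] at hres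
            rw [hres, zero_add]
            rfl
          have hfold := PySem.List.foldl_congr_mem combos _
            (fun (st : List Int × Int) c =>
              (st.1.modify (((pvCanon g p 1 c + L) % p).toNat) (fun x => x + 1), st.2 + 1))
            (List.replicate p.toNat 0, (0 : Int)) hbody
          rw [hfold, pv_replicate_eq_map,
            pv_countFold p (fun c => (pvCanon g p 1 c + L) % p) combos (fun _ => 0) 0
              (fun c _ => ⟨Int.emod_nonneg _ (by omega), Int.emod_lt_of_pos _ hp⟩)]
          have hrow2 : pvRow g p m.toNat 1 T 0 = (List.range p.toNat).map (fun (r : Nat) =>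
              ((combos.countP (fun c => decide (pvCanon g p 1 c = ((r : Nat) : Int))) : Nat) : Int)) := by
            unfold pvRow
            rw [show (((0 : Nat)) : Int) = 0 by norm_num, Int.toNat_of_nonneg hm0, hcombos]
          simp only [Prod.mk.injEq, Option.some.injEq]
          refine ⟨?_, ?_⟩
          · apply List.map_congr_left
            intro r hr
            have hrN : r < p.toNat := List.mem_range.mp hr
            have hq0 : (0 : Int) ≤ ((r : Int) - L) % p := Int.emod_nonneg _ (by omega)
            have hq1 : ((r : Int) - L) % p < p := Int.emod_lt_of_pos _ hp
            rw [hrow2, pv_pyGetD_map_range _ _ _ hq0 (by omega) 0, Int.toNat_of_nonneg hq0, zero_add]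
            congr 1
            apply List.countP_congr
            intro c _
            have hy0 := pv_canon_nonneg g p hp 1 c
            have hy1 := pv_canon_lt g p hp 1 c
            have hbij := pv_shift_bij p L (pvCanon g p 1 c) (r : Int) hy0 hy1 (by positivity) (by omega)
            rw [add_comm L (pvCanon g p 1 c)] at hbij
            simp only [decide_eq_true_eq]
            exact hbij
          · rw [hrow2, pv_sumRow p hp (pvCanon g p 1) combos
              (fun c _ => ⟨pv_canon_nonneg g p hp 1 c, pv_canon_lt g p hp 1 c⟩), zero_add]
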